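-- pv_equiv track=rewrite | github.com/MatiasNish/BinPackingProblem | Genetico.py | decodificar_bins
-- ===== SOURCE A (Python) =====
-- from typing import List, Tuple, Dict
--
-- def decodificar_bins(solution: List[int], items: List[int]) -> List[List[int]]:
--     """
--     Convierte un vector de asignacion (bin_id por objeto) en una lista de cajas (lista de listas de items).
--     Recompacta los IDs de bin para que salgan 0..k-1 en el orden en el que aparecen.
--     """
--     orden_ids = []
--     visto = set()
--     for b in solution:
--         if b not in visto:
--             visto.add(b)
--             orden_ids.append(b)
--     id_map = {old: new for new, old in enumerate(orden_ids)}
--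
--     bins_dict: Dict[int, List[int]] = {}
--     for i, bin_id in enumerate(solution):
--         bid = id_map[bin_id]
--         bins_dict.setdefault(bid, []).append(items[i])
--
--     # devolver en orden 0..k-1
--     k = len(bins_dict)
--     return [bins_dict[i] for i in range(k)]
-- ===== SOURCE B (Python) =====
-- from typing import List
--
--
-- def decodificar_bins(solution: List[int], items: List[int]) -> List[List[int]]:
--     # No grouping dict at all: first deduplicate the bin ids in first-appearance
--     # order, then build each bin by one filtering comprehension over the indices.
--     orden = list(dict.fromkeys(solution))
--     return [[items[i] for i in range(len(solution)) if solution[i] == b]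
--             for b in orden]
-- ===== Notes on version B (the rewrite author's own statement) =====
-- stated objective: alternative
-- what changed: Replaces A's incremental dict-of-lists grouping (seen-set + id_map + setdefault/append + range(k) rebuild) by a dict-free two-stage scheme: deduplicate the bin ids once, then build each bin directly with a filtering comprehension over the index range; trades O(n) grouping for O(n*k) repeated scans.
import Mathlib
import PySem

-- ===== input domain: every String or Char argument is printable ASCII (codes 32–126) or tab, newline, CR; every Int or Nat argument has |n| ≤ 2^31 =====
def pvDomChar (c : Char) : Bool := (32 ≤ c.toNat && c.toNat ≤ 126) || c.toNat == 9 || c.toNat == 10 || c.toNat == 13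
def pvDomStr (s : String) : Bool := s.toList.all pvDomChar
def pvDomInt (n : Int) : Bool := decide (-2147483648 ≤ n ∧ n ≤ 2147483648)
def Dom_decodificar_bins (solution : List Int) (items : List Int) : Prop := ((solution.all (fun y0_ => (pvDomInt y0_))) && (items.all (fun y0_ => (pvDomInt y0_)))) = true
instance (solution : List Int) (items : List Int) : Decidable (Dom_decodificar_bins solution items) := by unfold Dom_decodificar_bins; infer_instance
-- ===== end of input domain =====

-- B drops A's grouping dict entirely: it deduplicates the bin ids once, then builds each bin
-- by a filtering comprehension over the index range (alternative decomposition, not faster).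

-- ===== PORT A =====
def decodificar_bins (solution : List Int) (items : List Int) : List (List Int) :=
  -- first loop: orden_ids (list) and visto (set)
  let st := solution.foldl
    (fun (st : List Int × PySem.Set Int) b =>
      if PySem.Set.contains st.2 b then st else (st.1 ++ [b], PySem.Set.add st.2 b))
    ([], PySem.Set.empty)
  let ordenIds := st.1
  -- id_map = {old: new for new, old in enumerate(orden_ids)}
  let idMap : PySem.Dict Int Int :=
    PySem.Dict.ofList ((PySem.List.enumerate ordenIds).map (fun p => (p.2, p.1)))
  -- second loop: bins_dict.setdefault(bid, []).append(items[i]).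
  -- id_map[bin_id] via getD 0: the key is always present (bin_id ∈ orden_ids);
  -- items[i] via pyGetD: Pre_ keeps i below len(items), so the default is unreachable.
  let binsDict : PySem.Dict Int (List Int) :=
    (PySem.List.enumerate solution).foldl
      (fun d p => d.modify (idMap.getD p.2 0) []
        (fun l => l ++ [PySem.List.pyGetD items p.1 0]))
      PySem.Dict.empty
  -- [bins_dict[i] for i in range(k)]; bins_dict[i] via getD []: keys are exactly 0..k-1
  let k := binsDict.size
  (PySem.List.pyRange 0 (k : Int) 1).map (fun i => binsDict.getD i [])

-- ===== PORT B =====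
def decodificar_bins_alt (solution : List Int) (items : List Int) : List (List Int) :=
  -- orden = list(dict.fromkeys(solution)): the distinct ids in first-appearance order
  let orden : List Int := PySem.Set.ofList solution
  -- [[items[i] for i in range(len(solution)) if solution[i] == b] for b in orden];
  -- solution[i]/items[i] via pyGetD: Pre_ keeps i below len(items), so the default is unreachable.
  orden.map (fun b =>
    (PySem.List.pyRange 0 (solution.length : Int) 1).filterMap
      (fun i => if PySem.List.pyGetD solution i 0 == b
                then some (PySem.List.pyGetD items i 0) else none))

-- ===== PRECONDITION & SPEC =====
-- Python A (and B) raise IndexError on items[i] when solution is longer than items.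
def Pre_decodificar_bins (solution : List Int) (items : List Int) : Prop :=
  solution.length ≤ items.length
instance (solution : List Int) (items : List Int) : Decidable (Pre_decodificar_bins solution items) := by unfold Pre_decodificar_bins; infer_instance
def pvWitness_decodificar_bins : List Int × List Int := ([2, 0, 2, 5], [7, 8, 9, 10])

def Spec_decodificar_bins (solution : List Int) (items : List Int) (out : List (List Int)) : Prop := out = decodificar_bins_alt solution items
instance (solution : List Int) (items : List Int) (out : List (List Int)) : Decidable (Spec_decodificar_bins solution items out) := by unfold Spec_decodificar_bins; infer_instance

-- ===== CLAIM (what is proved, stated in full; the proofs are below) =====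
def Claim_equal_decodificar_bins : Prop := ∀ (solution : List Int) (items : List Int), Dom_decodificar_bins solution items → Pre_decodificar_bins solution items → Spec_decodificar_bins solution items (decodificar_bins solution items)

-- ===== LEMMAS AND PROOFS =====

-- A's first loop: both components end up as set(solution) in first-appearance order.
theorem pvFirstPass (l : List Int) : ∀ s : PySem.Set Int,
    l.foldl (fun (st : List Int × PySem.Set Int) b =>
        if PySem.Set.contains st.2 b then st else (st.1 ++ [b], PySem.Set.add st.2 b))
      (s, s)
    = (PySem.Set.update s l, PySem.Set.update s l) := by
  induction l with
  | nil => intro s; simp [PySem.Set.update]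
  | cons a t ih =>
    intro s
    have hstep : (if PySem.Set.contains s a then ((s : List Int), s)
          else (s ++ [a], PySem.Set.add s a)) = (PySem.Set.add s a, PySem.Set.add s a) := by
      by_cases hm : a ∈ s
      · simp [PySem.Set.add, hm]
      · simp [PySem.Set.add, hm]
    simp only [List.foldl_cons, hstep, ih, PySem.Set.update]

theorem pvFirstPassEmpty (l : List Int) :
    l.foldl (fun (st : List Int × PySem.Set Int) b =>
        if PySem.Set.contains st.2 b then st else (st.1 ++ [b], PySem.Set.add st.2 b))
      ([], PySem.Set.empty)
    = (PySem.Set.ofList l, PySem.Set.ofList l) := by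
  rw [PySem.Set.ofList_eq_foldl]
  exact pvFirstPass l PySem.Set.empty

-- grouping fold: the value stored at b is the filtered, mapped list
theorem pvGroupGetD (l : List (Int × Int)) (key val : (Int × Int) → Int) (b : Int) :
    (l.foldl (fun d p => d.modify (key p) [] (fun xs => xs ++ [val p])) PySem.Dict.empty).getD b []
    = (l.filter (fun p => key p == b)).map val := by
  have h := PySem.Dict.getD_foldl_modify_append
    (l.map (fun p => (key p, val p))) PySem.Dict.empty b
  rw [List.foldl_map] at h
  simpa [List.filter_map, List.map_map, Function.comp] using h

-- grouping fold: the keys are the distinct key-values in first-appearance order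
theorem pvGroupKeys (l : List (Int × Int)) (key val : (Int × Int) → Int) :
    (l.foldl (fun d p => d.modify (key p) [] (fun xs => xs ++ [val p])) PySem.Dict.empty).keys
    = PySem.Set.ofList (l.map key) := by
  have h := PySem.Dict.keys_foldl_modify_key l key []
    (fun _ p xs => xs ++ [val p]) PySem.Dict.empty
  simpa [PySem.Dict.keys_empty, PySem.Set.ofList_eq_foldl, PySem.Set.update] using h

-- adding images under an injective-on-domain map commutes with Set.update
theorem pvSetMapInj (f : Int → Int) (l : List Int) : ∀ s : PySem.Set Int,
    (∀ a, (a ∈ s ∨ a ∈ l) → ∀ b, (b ∈ s ∨ b ∈ l) → f a = f b → a = b) →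
    PySem.Set.update (s.map f) (l.map f) = (PySem.Set.update s l).map f := by
  induction l with
  | nil => intro s _; simp [PySem.Set.update]
  | cons a t ih =>
    intro s h
    have hadd : PySem.Set.add (List.map f s) (f a) = List.map f (PySem.Set.add s a) := by
      by_cases hm : a ∈ s
      · have hex : ∃ y ∈ s, f y = f a := ⟨a, hm, rfl⟩
        simp [PySem.Set.add, hm, hex]
      · have hex : ¬ ∃ y ∈ s, f y = f a := by
          rintro ⟨y, hy, hfy⟩
          have hya : y = a := h y (Or.inl hy) a (Or.inr List.mem_cons_self) hfy
          exact hm (hya ▸ hy)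
        simp [PySem.Set.add, hm, hex]
    have hsub : ∀ x, x ∈ PySem.Set.add s a → x ∈ s ∨ x ∈ a :: t := by
      intro x hx
      by_cases hm : a ∈ s
      · rw [show PySem.Set.add s a = s by simp [PySem.Set.add, hm]] at hx
        exact Or.inl hx
      · rw [show PySem.Set.add s a = s ++ [a] by simp [PySem.Set.add, hm]] at hx
        rcases List.mem_append.1 hx with hx | hx
        · exact Or.inl hx
        · exact Or.inr (by simp at hx; simp [hx])
    have hnext : ∀ x, (x ∈ PySem.Set.add s a ∨ x ∈ t) → ∀ y, (y ∈ PySem.Set.add s a ∨ y ∈ t) →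
        f x = f y → x = y := by
      intro x hx y hy
      refine h x ?_ y ?_
      · rcases hx with hx | hx
        · exact hsub x hx
        · exact Or.inr (List.mem_cons_of_mem _ hx)
      · rcases hy with hy | hy
        · exact hsub y hy
        · exact Or.inr (List.mem_cons_of_mem _ hy)
    simp only [List.map_cons, PySem.Set.update, List.foldl_cons]
    rw [hadd]
    exact ih (PySem.Set.add s a) hnext

-- the id_map lookup: position j of a Nodup list maps to j
theorem pvIdMapGetD (orden : List Int) (hn : orden.Nodup) (j : Nat) (hj : j < orden.length) :
    (PySem.Dict.ofList ((PySem.List.enumerate orden).map (fun p => (p.2, p.1)))).getD orden[j] 0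
    = (j : Int) := by
  set ps := (PySem.List.enumerate orden).map (fun p => (p.2, p.1)) with hps
  have hfst : ps.map (fun q => q.1) = orden := by
    simp [hps, List.map_map]
    exact PySem.List.map_snd_enumerate orden 0
  have hitems : (PySem.Dict.ofList ps).items = ps := by
    have h := PySem.Dict.items_foldl_insert_fresh ps (fun q => q.1) (fun q => q.2)
      PySem.Dict.empty (by intro a _; simp [PySem.Dict.contains_empty]) (by rw [hfst]; exact hn)
    simpa [PySem.Dict.ofList, PySem.Dict.update] using h
  have hkeys : (PySem.Dict.ofList ps).keys.Nodup := by
    simp only [PySem.Dict.keys, hitems]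
    rw [hfst]; exact hn
  have hmem : ((orden[j] : Int), (j : Int)) ∈ ps := by
    simp only [hps, List.mem_map]
    refine ⟨((j : Int), orden[j]), ?_, rfl⟩
    rw [PySem.List.mem_enumerate_iff]
    exact ⟨j, hj, by simp⟩
  exact PySem.Dict.getD_of_mem_items _ (by rw [hitems]; exact hmem) hkeys 0

-- filterMap with an if-some-else-none body is filter then map
theorem pvFilterMapIf {α β : Type} (l : List α) (p : α → Bool) (g : α → β) :
    l.filterMap (fun x => if p x then some (g x) else none) = (l.filter p).map g := by
  induction l with
  | nil => rfl
  | cons a t ih =>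
    by_cases hp : p a
    · simp [hp, ih]
    · simp [hp, ih]

-- B's per-bin comprehension equals the filter-over-enumerate form
theorem pvBinEq (solution items : List Int) (b : Int) :
    (PySem.List.pyRange 0 (solution.length : Int) 1).filterMap
      (fun i => if PySem.List.pyGetD solution i 0 == b
                then some (PySem.List.pyGetD items i 0) else none)
    = ((PySem.List.enumerate solution).filter (fun p => p.2 == b)).map
        (fun p => PySem.List.pyGetD items p.1 0) := by
  rw [PySem.List.enumerate_eq_map_pyRange solution 0, List.filter_map, List.map_map,
      pvFilterMapIf]
  rfl

-- ===== VERDICT (by name: the statement is the Claim_ definition above) =====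
theorem decodificar_bins_spec : Claim_equal_decodificar_bins := by
  intro solution items _ _
  unfold Spec_decodificar_bins
  simp only [decodificar_bins, decodificar_bins_alt, pvFirstPassEmpty]
  set orden : List Int := PySem.Set.ofList solution with horden
  have hnd : orden.Nodup := by rw [horden]; exact PySem.Set.nodup_ofList solution
  set idm : PySem.Dict Int Int :=
    PySem.Dict.ofList ((PySem.List.enumerate orden).map (fun p => (p.2, p.1))) with hidm
  -- id_map lookup is the position in orden_ids
  have hfb : ∀ b ∈ orden, idm.getD b 0 = ((orden.idxOf b : Nat) : Int) := by
    intro b hb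
    have hj : orden.idxOf b < orden.length := List.idxOf_lt_length_of_mem hb
    have h := pvIdMapGetD orden hnd (orden.idxOf b) hj
    rw [List.getElem_idxOf hj] at h
    rw [hidm]
    exact h
  -- the id_map lookup is injective on solution
  have hinj : ∀ a, (a ∈ ([] : List Int) ∨ a ∈ solution) → ∀ b, (b ∈ ([] : List Int) ∨ b ∈ solution) →
      (fun x => idm.getD x 0) a = (fun x => idm.getD x 0) b → a = b := by
    intro a ha b hb hab
    rcases ha with ha | ha
    · simp at ha
    rcases hb with hb | hb
    · simp at hb
    have ha' : a ∈ orden := by rw [horden]; exact (PySem.Set.mem_ofList solution a).2 ha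
    have hb' : b ∈ orden := by rw [horden]; exact (PySem.Set.mem_ofList solution b).2 hb
    simp only [] at hab
    rw [hfb a ha', hfb b hb'] at hab
    have hnat : orden.idxOf a = orden.idxOf b := by exact_mod_cast hab
    have hsome : orden[orden.idxOf a]? = orden[orden.idxOf b]? := by rw [hnat]
    rw [List.getElem?_eq_getElem (List.idxOf_lt_length_of_mem ha'),
        List.getElem?_eq_getElem (List.idxOf_lt_length_of_mem hb'),
        List.getElem_idxOf, List.getElem_idxOf] at hsome
    exact Option.some.inj hsome
  have hset : PySem.Set.ofList (solution.map (fun x => idm.getD x 0))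
      = orden.map (fun x => idm.getD x 0) := by
    have h := pvSetMapInj (fun x => idm.getD x 0) solution [] hinj
    rw [horden]
    simp only [PySem.Set.ofList_eq_foldl]
    simpa [PySem.Set.update] using h
  have hfmap : orden.map (fun x => idm.getD x 0)
      = (List.range orden.length).map (fun (j : Nat) => (j : Int)) := by
    apply List.ext_getElem
    · simp
    · intro j h1 h2
      have hj : j < orden.length := by simpa using h1
      simp only [List.getElem_map, List.getElem_range]
      rw [hfb (orden[j]'hj) (List.getElem_mem hj), List.Nodup.idxOf_getElem hnd]
  have hAg : ∀ c : Int, ((PySem.List.enumerate solution).foldl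
      (fun d p => d.modify (idm.getD p.2 0) [] (fun l => l ++ [PySem.List.pyGetD items p.1 0]))
      PySem.Dict.empty).getD c []
      = ((PySem.List.enumerate solution).filter (fun p => idm.getD p.2 0 == c)).map
          (fun p => PySem.List.pyGetD items p.1 0) :=
    fun c => pvGroupGetD _ _ _ c
  have hAk : ((PySem.List.enumerate solution).foldl
      (fun d p => d.modify (idm.getD p.2 0) [] (fun l => l ++ [PySem.List.pyGetD items p.1 0]))
      PySem.Dict.empty).keys
      = PySem.Set.ofList ((PySem.List.enumerate solution).map (fun p => idm.getD p.2 0)) :=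
    pvGroupKeys _ _ _
  have hms : (PySem.List.enumerate solution).map (fun p => idm.getD p.2 0)
      = solution.map (fun x => idm.getD x 0) := by
    have h2 := List.map_map (l := PySem.List.enumerate solution)
      (f := fun p : Int × Int => p.2) (g := fun x => idm.getD x 0)
    rw [PySem.List.map_snd_enumerate] at h2
    exact h2.symm
  have hsize : ((PySem.List.enumerate solution).foldl
      (fun d p => d.modify (idm.getD p.2 0) [] (fun l => l ++ [PySem.List.pyGetD items p.1 0]))
      PySem.Dict.empty).size = orden.length := by
    have h1 : ∀ (d : PySem.Dict Int (List Int)), d.size = d.keys.length := by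
      intro d; simp [PySem.Dict.size, PySem.Dict.keys]
    rw [h1, hAk, hms, hset, hfmap]
    simp
  rw [hsize, PySem.List.pyRange_zero_natCast, List.map_map]
  apply List.ext_getElem
  · simp
  intro j h1 h2
  have hj : j < orden.length := by simpa using h1
  simp only [List.getElem_map, List.getElem_range, Function.comp]
  rw [hAg, pvBinEq]
  refine congrArg _ (List.filter_congr ?_)
  intro p hp
  obtain ⟨kk, hkk, rfl⟩ := (PySem.List.mem_enumerate_iff solution 0 _).1 hp
  simp only []
  have hbmem : solution[kk] ∈ orden := by
    rw [horden]; exact (PySem.Set.mem_ofList solution _).2 (List.getElem_mem hkk)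
  rw [hfb _ hbmem]
  have hlt : orden.idxOf solution[kk] < orden.length := List.idxOf_lt_length_of_mem hbmem
  have hiff : orden.idxOf solution[kk] = j ↔ solution[kk] = orden[j] := by
    constructor
    · intro hh
      have h1' := List.getElem_idxOf hlt
      simp only [hh] at h1'
      exact h1'.symm
    · intro hh
      rw [hh]
      exact List.Nodup.idxOf_getElem hnd j hj
  by_cases hcd : solution[kk] = orden[j]
  · simp [hcd, List.Nodup.idxOf_getElem hnd]
  · have hx : ((orden.idxOf solution[kk] : Nat) : Int) ≠ ((j : Nat) : Int) := by
      intro hh; exact hcd (hiff.mp (by exact_mod_cast hh))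
    simp [hcd, hx]
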